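-- pv_equiv track=rewrite | github.com/dmitrymarov/silver-journey-test | gigacheck/data_scripts/detection/load_coauthor_data.py | get_ai_char_intervals
-- ===== SOURCE A (Python) =====
-- from typing import Any, Dict, List, Tuple
--
-- def get_ai_char_intervals(mask: str) -> List[List[int]]:
--     intervals = []
--     start = None
--
--     for i, char in enumerate(mask):
--         if char == "A":
--             if start is None:
--                 start = i
--         else:
--             if start is not None:
--                 intervals.append([start, i])
--                 start = None
--     if start is not None:
--         intervals.append([start, len(mask)])
--
--     return intervals
-- ===== SOURCE B (Python) =====
-- def get_ai_char_intervals(mask):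
--     # Jump run-by-run: at each 'A', scan to the run's end and emit the
--     # interval at once; no Option/flag state carried across the scan.
--     res = []
--     i = 0
--     n = len(mask)
--     while i < n:
--         if mask[i] == "A":
--             j = i + 1
--             while j < n and mask[j] == "A":
--                 j += 1
--             res.append([i, j])
--             i = j
--         else:
--             i += 1
--     return res
-- ===== Notes on version B (the rewrite author's own statement) =====
-- stated objective: alternative
-- what changed: Replaces the enumerate loop with an Option-typed open-interval flag by a run-jumping scan: at each 'A' an inner scan finds the run's end and the interval is emitted immediately, so no start/None state is threaded through the loop and no end-of-string flush is needed.
import Mathlib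
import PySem

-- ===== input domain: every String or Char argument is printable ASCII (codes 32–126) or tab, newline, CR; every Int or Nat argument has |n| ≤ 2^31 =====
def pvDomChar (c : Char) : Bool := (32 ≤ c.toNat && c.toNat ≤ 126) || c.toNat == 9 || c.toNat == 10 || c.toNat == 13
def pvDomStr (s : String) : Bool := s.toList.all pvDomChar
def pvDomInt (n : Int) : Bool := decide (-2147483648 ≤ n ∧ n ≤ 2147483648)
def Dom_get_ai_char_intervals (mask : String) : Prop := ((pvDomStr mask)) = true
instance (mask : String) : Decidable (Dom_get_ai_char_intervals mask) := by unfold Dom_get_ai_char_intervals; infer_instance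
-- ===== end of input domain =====

-- B replaces A's enumerate loop with an Option start-flag by a run-jumping scan
-- (at each 'A' the run's end is found at once and the interval emitted); alternative, same cost.

-- ===== PORT A =====
-- loop body of A's `for i, char in enumerate(mask)` (state = (intervals, start))
def pvStepA (st : List (List Int) × Option Int) (p : Int × Char) : List (List Int) × Option Int :=
  if p.2 == 'A' then
    match st.2 with
    | none => (st.1, some p.1)
    | some s => (st.1, some s)
  else
    match st.2 with
    | some s => (st.1 ++ [[s, p.1]], none)
    | none => (st.1, none)

def get_ai_char_intervals (mask : String) : List (List Int) :=
  let st := (PySem.List.enumerate mask.toList 0).foldl pvStepA ([], none)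
  match st.2 with
  | some s => st.1 ++ [[s, (mask.toList.length : Int)]]
  | none => st.1

-- ===== PORT B =====
-- B's outer while over runs: at an 'A' at index i, the inner `while` scan
-- (rendered as takeWhile, exact) finds the run end j = i+1+t; emit [i, j], continue at j.
def pvAltRuns : List Char → Int → List (List Int)
  | [], _ => []
  | c :: rest, i =>
    if c == 'A' then
      let t := (rest.takeWhile (· == 'A')).length
      [i, i + 1 + (t : Int)] :: pvAltRuns (rest.drop t) (i + 1 + (t : Int))
    else
      pvAltRuns rest (i + 1)
termination_by cs => cs.length
decreasing_by
  · exact Nat.lt_succ_of_le (by simp)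
  · simp

def get_ai_char_intervals_alt (mask : String) : List (List Int) :=
  pvAltRuns mask.toList 0

-- ===== PRECONDITION & SPEC =====
def Spec_get_ai_char_intervals (mask : String) (out : List (List Int)) : Prop := out = get_ai_char_intervals_alt mask
instance (mask : String) (out : List (List Int)) : Decidable (Spec_get_ai_char_intervals mask out) := by unfold Spec_get_ai_char_intervals; infer_instance

-- ===== CLAIM (what is proved, stated in full; the proofs are below) =====
def Claim_equal_get_ai_char_intervals : Prop := ∀ (mask : String), Dom_get_ai_char_intervals mask → Spec_get_ai_char_intervals mask (get_ai_char_intervals mask)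

-- ===== LEMMAS AND PROOFS =====

/-- Reference function: A's loop as a structural recursion producing intervals in order. -/
def pvRef : List Char → Int → Option Int → List (List Int)
  | [], i, start =>
    match start with
    | none => []
    | some s => [[s, i]]
  | c :: rest, i, start =>
    if c == 'A' then
      pvRef rest (i + 1) (match start with | none => some i | some s => some s)
    else
      match start with
      | some s => [s, i] :: pvRef rest (i + 1) none
      | none => pvRef rest (i + 1) none

/-- A's final flush of an open interval. -/
def pvFinish (st : List (List Int) × Option Int) (n : Int) : List (List Int) :=
  match st.2 with
  | some s => st.1 ++ [[s, n]]
  | none => st.1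

/-- A's fold, generalized over accumulator, start flag and base index, equals `pvRef`. -/
theorem pvA_fold (cs : List Char) : ∀ (i : Int) (acc : List (List Int)) (start : Option Int),
    pvFinish ((PySem.List.enumerate cs i).foldl pvStepA (acc, start)) (i + (cs.length : Int))
      = acc ++ pvRef cs i start := by
  induction cs with
  | nil =>
    intro i acc start
    cases start <;> simp [PySem.List.enumerate, pvFinish, pvRef]
  | cons c rest ih =>
    intro i acc start
    have hlen : i + ((c :: rest).length : Int) = (i + 1) + (rest.length : Int) := by
      simp only [List.length_cons]; push_cast; ring
    rw [PySem.List.enumerate_cons, List.foldl_cons, hlen]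
    by_cases hc : c == 'A'
    · cases start <;> simp only [pvStepA, hc, if_pos, pvRef, ih]
    · cases start <;> simp [pvStepA, hc, pvRef, ih]

theorem pvDrop_takeWhile {α : Type} (p : α → Bool) (l : List α) :
    l.drop ((l.takeWhile p).length) = l.dropWhile p := by
  induction l with
  | nil => simp
  | cons c r ih =>
    by_cases h : p c <;> simp [h, ih]

theorem pvRef_some (rest : List Char) : ∀ (s i : Int),
    pvRef rest i (some s)
      = [s, i + ((rest.takeWhile (· == 'A')).length : Int)]
        :: pvRef (rest.dropWhile (· == 'A')) (i + ((rest.takeWhile (· == 'A')).length : Int)) none := by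
  induction rest with
  | nil => intro s i; simp [pvRef]
  | cons c r ih =>
    intro s i
    by_cases hc : c == 'A'
    · simp only [pvRef, hc, if_pos, List.takeWhile_cons, List.dropWhile_cons]
      rw [ih s (i + 1)]
      have : i + 1 + ((r.takeWhile (· == 'A')).length : Int)
           = i + (((r.takeWhile (· == 'A')).length + 1 : Nat) : Int) := by push_cast; ring
      simp [this]
    · simp [pvRef, hc]

theorem pvAlt_eq_ref (cs : List Char) (i : Int) : pvAltRuns cs i = pvRef cs i none := by
  fun_induction pvAltRuns cs i with
  | case1 => simp [pvRef]
  | case2 c rest i hc t ih =>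
    rw [pvRef]
    simp only [hc, if_true]
    rw [pvRef_some rest i (i + 1), ih, ← pvDrop_takeWhile]
  | case3 c rest i hc ih =>
    simp only [hc, Bool.false_eq_true, if_neg, not_false_iff, pvRef, ih]

-- ===== VERDICT (by name: the statement is the Claim_ definition above) =====
theorem get_ai_char_intervals_spec : Claim_equal_get_ai_char_intervals := by
  intro mask _
  unfold Spec_get_ai_char_intervals get_ai_char_intervals get_ai_char_intervals_alt
  rw [pvAlt_eq_ref]
  have h := pvA_fold mask.toList 0 [] none
  rw [zero_add] at h
  simpa [pvFinish] using h
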